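-- pv_equiv track=rewrite | github.com/makitaalis/colab | scripts/fleet_api_keys.py | merge_env_text
-- ===== SOURCE A (Python) =====
-- def merge_env_text(existing_text: str, updates: dict[str, str]) -> str:
--     lines = existing_text.splitlines()
--     key_to_index: dict[str, int] = {}
--     for idx, raw in enumerate(lines):
--         stripped = raw.strip()
--         if not stripped or stripped.startswith("#") or "=" not in stripped:
--             continue
--         key, _ = stripped.split("=", 1)
--         key_to_index[key.strip()] = idx
--
--     for key, value in updates.items():
--         line = f"{key}={value}"
--         if key in key_to_index:
--             lines[key_to_index[key]] = line
--         else: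
--             lines.append(line)
--
--     return ("\n".join(lines).rstrip() + "\n") if lines else ""
-- ===== SOURCE B (Python) =====
-- def merge_env_text(existing_text: str, updates: dict[str, str]) -> str:
--     def parse_key(raw):
--         stripped = raw.strip()
--         if not stripped or stripped.startswith("#") or "=" not in stripped:
--             return None
--         return stripped.split("=", 1)[0].strip()
--
--     lines = existing_text.splitlines()
--     new_rev = []
--     applied = set()
--     for raw in reversed(lines):
--         key = parse_key(raw)
--         if key is not None and key in updates and key not in applied:
--             new_rev.append(f"{key}={updates[key]}")
--             applied.add(key)
--         else:
--             new_rev.append(raw)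
--     new_rev.reverse()
--     new_lines = new_rev + [f"{k}={v}" for k, v in updates.items() if k not in applied]
--     return ("\n".join(new_lines).rstrip() + "\n") if new_lines else ""
-- ===== Notes on version B (the rewrite author's own statement) =====
-- stated objective: alternative
-- what changed: Replaces A's key-to-last-index dict plus random-access overwrites with a single reverse scan over the lines that rewrites the last occurrence of each update key in place (tracking a set of applied keys), then appends the remaining updates in order.
import Mathlib
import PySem

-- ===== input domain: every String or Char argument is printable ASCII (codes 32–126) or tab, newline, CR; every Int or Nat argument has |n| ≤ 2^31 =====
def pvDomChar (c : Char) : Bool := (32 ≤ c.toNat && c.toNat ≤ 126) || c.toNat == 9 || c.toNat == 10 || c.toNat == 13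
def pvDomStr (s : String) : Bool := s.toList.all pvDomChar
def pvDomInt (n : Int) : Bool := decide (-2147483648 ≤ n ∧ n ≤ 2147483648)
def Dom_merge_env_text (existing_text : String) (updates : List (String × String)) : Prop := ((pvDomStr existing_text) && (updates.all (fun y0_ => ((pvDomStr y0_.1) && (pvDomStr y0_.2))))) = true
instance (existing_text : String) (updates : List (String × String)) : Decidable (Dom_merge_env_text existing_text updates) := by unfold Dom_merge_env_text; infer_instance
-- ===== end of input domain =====

-- B replaces A's key→last-index dict and random-access overwrites by one reverse scan
-- rewriting last occurrences with a set of applied keys (alternative decomposition, same cost).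

-- ===== PORT A =====
-- shared line parser: returns the stripped key of an assignment line, none for blank/comment/no-'=' lines
def parseKey? (raw : String) : Option String :=
  let stripped := PySem.Str.strip raw
  if PySem.Str.len stripped == 0 then none
  else if PySem.Str.startswith stripped "#" then none
  else if !(PySem.Str.isIn "=" stripped) then none
  else
    match PySem.Str.splitMax? stripped "=" 1 with
    | some (k :: _) => some (PySem.Str.strip k)
    | _ => none   -- unreachable: "=" occurs in stripped

def merge_env_text (existing_text : String) (updates : List (String × String)) : String :=
  let lines := PySem.Str.splitlines existing_text
  let key_to_index : PySem.Dict String Int :=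
    (PySem.List.enumerate lines).foldl
      (fun d p =>
        match parseKey? p.2 with
        | some k => d.insert k p.1
        | none => d) PySem.Dict.empty
  let lines :=
    (PySem.Dict.ofList updates).items.foldl
      (fun ls kv =>
        let line := kv.1 ++ "=" ++ kv.2
        match key_to_index.get? kv.1 with
        | some idx => PySem.List.pySetD ls idx line
        | none => ls ++ [line]) lines
  if lines = [] then "" else PySem.Str.rstrip (PySem.Str.join "\n" lines) ++ "\n"

-- ===== PORT B =====
def merge_env_text_alt (existing_text : String) (updates : List (String × String)) : String :=
  let lines := PySem.Str.splitlines existing_text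
  let d := PySem.Dict.ofList updates
  let st :=
    lines.reverse.foldl
      (fun (st : List String × PySem.Set String) raw =>
        match parseKey? raw with
        | some key =>
          match d.get? key with
          | some v =>
            if PySem.Set.contains st.2 key then (st.1 ++ [raw], st.2)
            else (st.1 ++ [key ++ "=" ++ v], PySem.Set.add st.2 key)
          | none => (st.1 ++ [raw], st.2)
        | none => (st.1 ++ [raw], st.2)) ([], PySem.Set.empty)
  let new_lines :=
    st.1.reverse ++
      (d.items.filter (fun kv => !(PySem.Set.contains st.2 kv.1))).map (fun kv => kv.1 ++ "=" ++ kv.2)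
  if new_lines = [] then "" else PySem.Str.rstrip (PySem.Str.join "\n" new_lines) ++ "\n"

-- ===== PRECONDITION & SPEC =====
def Spec_merge_env_text (existing_text : String) (updates : List (String × String)) (out : String) : Prop := out = merge_env_text_alt existing_text updates
instance (existing_text : String) (updates : List (String × String)) (out : String) : Decidable (Spec_merge_env_text existing_text updates out) := by unfold Spec_merge_env_text; infer_instance

-- ===== CLAIM (what is proved, stated in full; the proofs are below) =====
def Claim_equal_merge_env_text : Prop := ∀ (existing_text : String) (updates : List (String × String)), Dom_merge_env_text existing_text updates → Spec_merge_env_text existing_text updates (merge_env_text existing_text updates)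

-- ===== LEMMAS AND PROOFS =====

-- canonical description of the rewritten line block: a line is replaced iff it is the LAST
-- line whose parsed key is k and the update map f has a value for k
def hstep (f : String → Option String) (raw : String) (rest : List String) : String :=
  match parseKey? raw with
  | some k =>
    if rest.any (fun l => parseKey? l == some k) then raw
    else
      match f k with
      | some v => k ++ "=" ++ v
      | none => raw
  | none => raw

def canon (f : String → Option String) : List String → List String
  | [] => []
  | raw :: rest => hstep f raw rest :: canon f rest

-- the appended block: updates whose key occurs on no line, in update order
def apps (P : List (String × String)) (lines : List String) : List String :=
  (P.filter (fun kv => !(lines.any (fun l => parseKey? l == some kv.1)))).map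
    (fun kv => kv.1 ++ "=" ++ kv.2)

def dA (lines : List String) : PySem.Dict String Int :=
  (PySem.List.enumerate lines).foldl
    (fun d p =>
      match parseKey? p.2 with
      | some k => d.insert k p.1
      | none => d) PySem.Dict.empty

def stepA (lines : List String) (ls : List String) (kv : String × String) : List String :=
  let line := kv.1 ++ "=" ++ kv.2
  match (dA lines).get? kv.1 with
  | some idx => PySem.List.pySetD ls idx line
  | none => ls ++ [line]

def stepB (d : PySem.Dict String String) (st : List String × PySem.Set String)
    (raw : String) : List String × PySem.Set String :=
  match parseKey? raw with
  | some key =>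
    match d.get? key with
    | some v =>
      if PySem.Set.contains st.2 key then (st.1 ++ [raw], st.2)
      else (st.1 ++ [key ++ "=" ++ v], PySem.Set.add st.2 key)
    | none => (st.1 ++ [raw], st.2)
  | none => (st.1 ++ [raw], st.2)

theorem contains_add (s : PySem.Set String) (x y : String) :
    PySem.Set.contains (PySem.Set.add s x) y = (PySem.Set.contains s y || y == x) := by
  by_cases hcx : x ∈ s
  · rw [PySem.Set.add_of_mem hcx]
    by_cases hyx : y = x
    · subst hyx
      rw [show PySem.Set.contains s y = true from List.elem_eq_true_of_mem hcx]
      simp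
    · rw [beq_eq_false_iff_ne.mpr hyx, Bool.or_false]
  · rw [PySem.Set.add_of_not_mem hcx]
    by_cases hys : y ∈ s
    · rw [show PySem.Set.contains (s ++ [x] : List String) y = true from
        List.elem_eq_true_of_mem (List.mem_append_left _ hys),
        show PySem.Set.contains s y = true from List.elem_eq_true_of_mem hys]
      simp
    · by_cases hyx : y = x
      · subst hyx
        rw [show PySem.Set.contains (s ++ [y] : List String) y = true from
          List.elem_eq_true_of_mem (List.mem_append_right _ (List.mem_singleton_self y))]
        simp
      · have h1 : PySem.Set.contains (s ++ [x] : List String) y = false := by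
          have : y ∉ s ++ [x] := by
            intro h
            rcases List.mem_append.mp h with h | h
            · exact hys h
            · exact hyx (List.mem_singleton.mp h)
          cases hc : PySem.Set.contains (s ++ [x] : List String) y
          · rfl
          · exact absurd (List.mem_of_elem_eq_true hc) this
        have h2 : PySem.Set.contains s y = false := by
          cases hc : PySem.Set.contains s y
          · rfl
          · exact absurd (List.mem_of_elem_eq_true hc) hys
        rw [h1, h2, beq_eq_false_iff_ne.mpr hyx]
        rfl

theorem canon_length (f : String → Option String) (ls : List String) :
    (canon f ls).length = ls.length := by
  induction ls with
  | nil => rfl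
  | cons a t ih => simp [canon, ih]

theorem canon_getElem (f : String → Option String) (ls : List String) (j : Nat)
    (h : j < ls.length) :
    (canon f ls)[j]'(by rw [canon_length]; exact h) = hstep f ls[j] (ls.drop (j + 1)) := by
  induction ls generalizing j with
  | nil => simp at h
  | cons a t ih =>
    cases j with
    | zero => simp [canon]
    | succ j => simpa [canon] using ih j (by simpa using h)

theorem canon_ext (f g : String → Option String) (ls : List String)
    (h : ∀ k, (∃ l ∈ ls, parseKey? l = some k) → f k = g k) :
    canon f ls = canon g ls := by
  induction ls with
  | nil => rfl
  | cons a t ih =>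
    have ht : canon f t = canon g t := ih (fun k hk => h k (by obtain ⟨l, hl, hp⟩ := hk; exact ⟨l, List.mem_cons_of_mem _ hl, hp⟩))
    have ha : hstep f a t = hstep g a t := by
      unfold hstep
      cases hp : parseKey? a with
      | none => rfl
      | some k =>
        have := h k ⟨a, List.mem_cons_self .., hp⟩
        simp [this]
    simp [canon, ha, ht]

theorem canon_none (ls : List String) : canon (fun _ => none) ls = ls := by
  induction ls with
  | nil => rfl
  | cons a t ih =>
    have : hstep (fun _ => none) a t = a := by
      unfold hstep
      cases parseKey? a <;> simp
    simp [canon, this, ih]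

theorem dA_append (ls : List String) (x : String) :
    dA (ls ++ [x]) = (match parseKey? x with
      | some k => (dA ls).insert k (ls.length : Int)
      | none => dA ls) := by
  unfold dA
  rw [PySem.List.enumerate_append, List.foldl_append]
  simp [PySem.List.enumerate_cons, PySem.List.enumerate_nil]

theorem dA_none (ls : List String) (k : String) :
    (dA ls).get? k = none ↔ ∀ l ∈ ls, parseKey? l ≠ some k := by
  induction ls using List.reverseRecOn with
  | nil => simp [dA, PySem.List.enumerate_nil, PySem.Dict.get?_empty]
  | append_singleton xs x ih =>
    rw [dA_append]
    cases hp : parseKey? x with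
    | none =>
      simp only []
      rw [ih]
      constructor
      · intro h l hl
        rcases List.mem_append.mp hl with hl | hl
        · exact h l hl
        · rw [List.mem_singleton.mp hl, hp]; simp
      · intro h l hl
        exact h l (List.mem_append_left _ hl)
    | some k0 =>
      simp only []
      rw [PySem.Dict.get?_insert]
      by_cases hk : k = k0
      · subst hk
        simp only [if_pos rfl]
        constructor
        · intro h; cases h
        · intro h
          exact absurd hp (h x (List.mem_append_right _ (List.mem_singleton_self x)))
      · rw [if_neg hk, ih]
        constructor
        · intro h l hl
          rcases List.mem_append.mp hl with hl | hl
          · exact h l hl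
          · rw [List.mem_singleton.mp hl, hp]
            intro hc
            exact hk (by injection hc with h2; exact h2.symm)
        · intro h l hl
          exact h l (List.mem_append_left _ hl)

theorem dA_some (ls : List String) (k : String) (n : Int)
    (h : (dA ls).get? k = some n) :
    ∃ i : Nat, n = (i : Int) ∧ ∃ raw, ls[i]? = some raw ∧ parseKey? raw = some k ∧
      ∀ l ∈ ls.drop (i + 1), parseKey? l ≠ some k := by
  induction ls using List.reverseRecOn generalizing n with
  | nil => simp [dA, PySem.List.enumerate_nil, PySem.Dict.get?_empty] at h
  | append_singleton xs x ih =>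
    rw [dA_append] at h
    cases hp : parseKey? x with
    | none =>
      rw [hp] at h
      simp only [] at h
      obtain ⟨i, hn, raw, hget, hpraw, hdrop⟩ := ih n h
      have hi : i < xs.length := (List.getElem?_eq_some_iff.mp hget).1
      refine ⟨i, hn, raw, ?_, hpraw, ?_⟩
      · rw [List.getElem?_append_left hi]; exact hget
      · rw [List.drop_append_of_le_length (by omega)]
        intro l hl
        rcases List.mem_append.mp hl with hl | hl
        · exact hdrop l hl
        · rw [List.mem_singleton.mp hl, hp]; simp
    | some k0 =>
      rw [hp] at h
      simp only [] at h
      rw [PySem.Dict.get?_insert] at h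
      by_cases hk : k = k0
      · subst hk
        rw [if_pos rfl] at h
        injection h with h
        refine ⟨xs.length, h.symm, x, ?_, hp, ?_⟩
        · rw [List.getElem?_concat_length]
        · rw [List.drop_eq_nil_of_le (by simp)]
          intro l hl; cases hl
      · rw [if_neg hk] at h
        obtain ⟨i, hn, raw, hget, hpraw, hdrop⟩ := ih n h
        have hi : i < xs.length := (List.getElem?_eq_some_iff.mp hget).1
        refine ⟨i, hn, raw, ?_, hpraw, ?_⟩
        · rw [List.getElem?_append_left hi]; exact hget
        · rw [List.drop_append_of_le_length (by omega)]
          intro l hl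
          rcases List.mem_append.mp hl with hl | hl
          · exact hdrop l hl
          · rw [List.mem_singleton.mp hl, hp]
            intro hc
            exact hk (Option.some.inj hc).symm

theorem mem_drop_of_getElem (lines : List String) (m p : Nat) (hp : p < lines.length)
    (hmp : m ≤ p) : lines[p] ∈ lines.drop m := by
  have h2 : (lines.drop m)[p - m]? = lines[p]? := by
    rw [List.getElem?_drop]
    congr 1
    omega
  rw [List.getElem?_eq_getElem hp] at h2
  exact List.mem_of_getElem? h2

theorem canon_set (f : String → Option String) (lines : List String) (i : Nat)
    (k v raw : String) (hget : lines[i]? = some raw) (hpk : parseKey? raw = some k)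
    (hdrop : ∀ l ∈ lines.drop (i + 1), parseKey? l ≠ some k) :
    (canon f lines).set i (k ++ "=" ++ v)
      = canon (fun k' => if k' = k then some v else f k') lines := by
  obtain ⟨hi, hraw⟩ := List.getElem?_eq_some_iff.mp hget
  apply List.ext_getElem
  · simp [canon_length]
  · intro j hj1 hj2
    have hjlen : j < lines.length := by
      have := hj2; rwa [canon_length] at this
    rw [List.getElem_set]
    rw [canon_getElem (fun k' => if k' = k then some v else f k') lines j hjlen]
    by_cases hji : i = j
    · subst hji
      rw [if_pos rfl]
      have hdf : (lines.drop (i + 1)).any (fun l => parseKey? l == some k) = false :=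
        List.any_eq_false.mpr (fun l hl => by simp [hdrop l hl])
      simp only [hstep, hraw, hpk, hdf]
      simp
    · rw [if_neg hji]
      rw [canon_getElem f lines j hjlen]
      cases hpj : parseKey? lines[j] with
      | none => simp only [hstep, hpj]
      | some k2 =>
        cases hany : (lines.drop (j + 1)).any (fun l => parseKey? l == some k2) with
        | true => simp [hstep, hpj, hany]
        | false =>
          simp only [hstep, hpj, hany]
          by_cases hk2 : k2 = k
          · exfalso
            subst hk2
            rcases Nat.lt_or_ge j i with hlt | hge
            · have hmem : lines[i] ∈ lines.drop (j + 1) :=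
                mem_drop_of_getElem lines (j + 1) i hi (by omega)
              have := List.any_eq_false.mp hany _ hmem
              rw [hraw, hpk] at this
              simp at this
            · have hlt2 : i < j := by omega
              have hmem : lines[j] ∈ lines.drop (i + 1) :=
                mem_drop_of_getElem lines (i + 1) j hjlen (by omega)
              exact absurd hpj (hdrop _ hmem)
          · rw [if_neg hk2]

theorem lookup_cons' (k : String) (a : String × String) (Q : List (String × String)) :
    List.lookup k (a :: Q) = if k = a.1 then some a.2 else List.lookup k Q := by
  obtain ⟨a1, a2⟩ := a
  by_cases h : k = a1
  · simp [List.lookup, h]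
  · rw [if_neg h, show List.lookup k ((a1, a2) :: Q) = match k == a1 with
      | true => some a2 | false => List.lookup k Q from rfl,
      show (k == a1) = false from beq_eq_false_iff_ne.mpr h]

theorem lookup_eq_none_of_not_mem (k : String) (Q : List (String × String))
    (h : k ∉ Q.map Prod.fst) : List.lookup k Q = none := by
  induction Q with
  | nil => rfl
  | cons a Q ih =>
    simp only [List.map_cons, List.mem_cons] at h
    push Not at h
    rw [lookup_cons', if_neg h.1]
    exact ih h.2

theorem mem_of_lookup_eq_some (k v : String) (Q : List (String × String))
    (h : List.lookup k Q = some v) : (k, v) ∈ Q := by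
  induction Q with
  | nil => cases h
  | cons a Q ih =>
    rw [lookup_cons'] at h
    by_cases hk : k = a.1
    · rw [if_pos hk] at h
      injection h with h
      have : a = (k, v) := by
        obtain ⟨a1, a2⟩ := a
        simp_all
      rw [this]
      exact List.mem_cons_self ..
    · rw [if_neg hk] at h
      exact List.mem_cons_of_mem _ (ih h)

theorem foldA (lines : List String) (Q : List (String × String))
    (f : String → Option String) (app : List String)
    (hnd : (Q.map Prod.fst).Nodup) (hfresh : ∀ kv ∈ Q, f kv.1 = none) :
    Q.foldl (stepA lines) (canon f lines ++ app)
    = canon (fun k => (Q.lookup k).or (f k)) lines ++ app ++ apps Q lines := by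
  induction Q generalizing f app with
  | nil =>
    simp only [List.foldl_nil, apps, List.filter_nil, List.map_nil, List.append_nil]
    rfl
  | cons kv Q ih =>
    obtain ⟨k, v⟩ := kv
    simp only [List.map_cons, List.nodup_cons] at hnd
    obtain ⟨hknotin, hnd'⟩ := hnd
    have hfk : f k = none := hfresh (k, v) (List.mem_cons_self ..)
    have hfresh' : ∀ kv ∈ Q, f kv.1 = none :=
      fun kv h => hfresh kv (List.mem_cons_of_mem _ h)
    rw [List.foldl_cons]
    cases hd : (dA lines).get? k with
    | none =>
      have hnone : ∀ l ∈ lines, parseKey? l ≠ some k := (dA_none lines k).mp hd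
      have hanyf : lines.any (fun l => parseKey? l == some k) = false := by
        rw [List.any_eq_false]
        intro l hl
        simp [hnone l hl]
      have hstep1 : stepA lines (canon f lines ++ app) (k, v)
          = canon f lines ++ (app ++ [k ++ "=" ++ v]) := by
        simp [stepA, hd]
      rw [hstep1, ih f (app ++ [k ++ "=" ++ v]) hnd' hfresh']
      have hcanon : canon (fun k' => (List.lookup k' Q).or (f k')) lines
          = canon (fun k' => (List.lookup k' ((k, v) :: Q)).or (f k')) lines := by
        apply canon_ext
        intro k2 hk2
        obtain ⟨l, hl, hpl⟩ := hk2
        have hne : k ≠ k2 := fun h => hnone l hl (h ▸ hpl)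
        rw [lookup_cons', if_neg (Ne.symm hne)]
      have happs : apps ((k, v) :: Q) lines = (k ++ "=" ++ v) :: apps Q lines := by
        unfold apps
        rw [List.filter_cons]
        simp [hanyf]
      rw [hcanon, happs]
      simp [List.append_assoc]
    | some idx =>
      obtain ⟨i, hn, raw, hget, hpraw, hdrop⟩ := dA_some lines k idx hd
      have hi : i < lines.length := (List.getElem?_eq_some_iff.mp hget).1
      have hanyt : lines.any (fun l => parseKey? l == some k) = true := by
        rw [List.any_eq_true]
        exact ⟨raw, List.mem_of_getElem? hget, by simp [hpraw]⟩
      have hstep1 : stepA lines (canon f lines ++ app) (k, v)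
          = (canon f lines).set i (k ++ "=" ++ v) ++ app := by
        simp only [stepA, hd, hn]
        rw [PySem.List.pySetD_natCast]
        rw [List.set_append_left]
        rw [canon_length]
        exact hi
      rw [hstep1, canon_set f lines i k v raw hget hpraw hdrop]
      rw [ih (fun k' => if k' = k then some v else f k') app hnd'
        (fun kv h => by
          have : kv.1 ≠ k := fun hh => hknotin (hh ▸ List.mem_map_of_mem h)
          simp only [if_neg this]
          exact hfresh' kv h)]
      have hcanon : canon (fun k' => (List.lookup k' Q).or (if k' = k then some v else f k')) lines
          = canon (fun k' => (List.lookup k' ((k, v) :: Q)).or (f k')) lines := by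
        apply canon_ext
        intro k2 _
        rw [lookup_cons']
        by_cases hk2 : k2 = k
        · subst hk2
          rw [if_pos rfl, if_pos rfl]
          rw [lookup_eq_none_of_not_mem k2 Q hknotin]
          rfl
        · rw [if_neg hk2, if_neg hk2]
      have happs : apps ((k, v) :: Q) lines = apps Q lines := by
        unfold apps
        rw [List.filter_cons]
        simp [hanyt]
      rw [hcanon, happs]

theorem foldB (lines : List String) (d : PySem.Dict String String) :
    (lines.reverse.foldl (stepB d) ([], PySem.Set.empty)).1
      = (canon (fun k => d.get? k) lines).reverse
    ∧ ∀ k, PySem.Set.contains (lines.reverse.foldl (stepB d) ([], PySem.Set.empty)).2 k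
      = ((d.get? k).isSome && lines.any (fun l => parseKey? l == some k)) := by
  induction lines with
  | nil =>
    refine ⟨rfl, fun k => ?_⟩
    simp [PySem.Set.empty]
  | cons raw rest ih =>
    obtain ⟨ih1, ih2⟩ := ih
    rw [List.reverse_cons, List.foldl_append]
    generalize hr : List.foldl (stepB d) ([], PySem.Set.empty) rest.reverse = r at ih1 ih2
    simp only [List.foldl_cons, List.foldl_nil]
    have hcanon : canon (fun k => d.get? k) (raw :: rest)
        = hstep (fun k => d.get? k) raw rest :: canon (fun k => d.get? k) rest := rfl
    cases hp : parseKey? raw with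
    | none =>
      have h1 : (stepB d r raw).1 = r.1 ++ [raw] := by simp [stepB, hp]
      have h2 : (stepB d r raw).2 = r.2 := by simp [stepB, hp]
      refine ⟨?_, fun k => ?_⟩
      · rw [h1, ih1, hcanon, List.reverse_cons]
        have : hstep (fun k => d.get? k) raw rest = raw := by simp [hstep, hp]
        rw [this]
      · rw [h2, ih2 k, List.any_cons, hp]
        simp
    | some key =>
      cases hg : d.get? key with
      | none =>
        have h1 : (stepB d r raw).1 = r.1 ++ [raw] := by simp [stepB, hp, hg]
        have h2 : (stepB d r raw).2 = r.2 := by simp [stepB, hp, hg]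
        refine ⟨?_, fun k => ?_⟩
        · rw [h1, ih1, hcanon, List.reverse_cons]
          have : hstep (fun k => d.get? k) raw rest = raw := by
            simp only [hstep, hp, hg]
            split <;> rfl
          rw [this]
        · rw [h2, ih2 k, List.any_cons, hp]
          by_cases hk : k = key
          · subst hk; simp [hg]
          · rw [show (some key == some k : Bool) = false by simp [Ne.symm hk], Bool.false_or]
      | some v =>
        have hcany := ih2 key
        rw [hg] at hcany
        simp only [Option.isSome_some, Bool.true_and] at hcany
        cases hcb : PySem.Set.contains r.2 key with
        | true =>
          have hany : rest.any (fun l => parseKey? l == some key) = true := by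
            rw [← hcany]; exact hcb
          have hmem : key ∈ r.2 := List.mem_of_elem_eq_true hcb
          have h1 : (stepB d r raw).1 = r.1 ++ [raw] := by simp [stepB, hp, hg, hmem]
          have h2 : (stepB d r raw).2 = r.2 := by simp [stepB, hp, hg, hmem]
          refine ⟨?_, fun k => ?_⟩
          · rw [h1, ih1, hcanon, List.reverse_cons]
            have : hstep (fun k => d.get? k) raw rest = raw := by
              simp [hstep, hp, hg, hany]
            rw [this]
          · rw [h2, ih2 k, List.any_cons, hp]
            by_cases hk : k = key
            · subst hk; simp [hg, hany]
            · rw [show (some key == some k : Bool) = false by simp [Ne.symm hk], Bool.false_or]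
        | false =>
          have hany : rest.any (fun l => parseKey? l == some key) = false := by
            rw [← hcany]; exact hcb
          have hmem : key ∉ r.2 := fun h => by
            have h2 := List.elem_eq_true_of_mem h
            rw [show List.elem key r.2 = PySem.Set.contains r.2 key from rfl, hcb] at h2
            cases h2
          have h1 : (stepB d r raw).1 = r.1 ++ [key ++ "=" ++ v] := by
            simp [stepB, hp, hg, hmem]
          have h2 : (stepB d r raw).2 = PySem.Set.add r.2 key := by
            simp [stepB, hp, hg, hmem]
          refine ⟨?_, fun k => ?_⟩
          · rw [h1, ih1, hcanon, List.reverse_cons]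
            have : hstep (fun k => d.get? k) raw rest = key ++ "=" ++ v := by
              simp [hstep, hp, hg, hany]
            rw [this]
          · rw [h2, contains_add, ih2 k, List.any_cons, hp]
            by_cases hk : k = key
            · subst hk; simp [hg, hany]
            · rw [show (some key == some k : Bool) = false by simp [Ne.symm hk], Bool.false_or,
                beq_eq_false_iff_ne.mpr hk, Bool.or_false]

theorem not_mem_of_lookup_eq_none (k : String) (Q : List (String × String))
    (h : List.lookup k Q = none) : k ∉ Q.map Prod.fst := by
  induction Q with
  | nil => simp
  | cons a Q ih =>
    rw [lookup_cons'] at h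
    by_cases hk : k = a.1
    · rw [if_pos hk] at h; cases h
    · rw [if_neg hk] at h
      simp only [List.map_cons, List.mem_cons]
      exact fun hm => hm.elim hk (ih h)

theorem lookup_items_eq_get? (d : PySem.Dict String String) (hnd : d.keys.Nodup)
    (k : String) : List.lookup k d.items = d.get? k := by
  cases hl : List.lookup k d.items with
  | some v =>
    exact (PySem.Dict.get?_of_mem_items d (mem_of_lookup_eq_some k v _ hl) hnd).symm
  | none =>
    have hnm : k ∉ d.keys := not_mem_of_lookup_eq_none k d.items hl
    exact ((PySem.Dict.get?_eq_none_iff_not_mem_keys d k).mpr hnm).symm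

-- ===== VERDICT (by name: the statement is the Claim_ definition above) =====
theorem merge_env_text_spec : Claim_equal_merge_env_text := by
  intro ex updates _
  unfold Spec_merge_env_text
  have hkeys : (PySem.Dict.ofList updates).keys.Nodup := PySem.Dict.nodup_keys_ofList updates
  have hnd' : ((PySem.Dict.ofList updates).items.map Prod.fst).Nodup := hkeys
  have hA : merge_env_text ex updates =
      (if (PySem.Dict.ofList updates).items.foldl (stepA (PySem.Str.splitlines ex))
            (PySem.Str.splitlines ex) = [] then ""
       else PySem.Str.rstrip (PySem.Str.join "\n"
         ((PySem.Dict.ofList updates).items.foldl (stepA (PySem.Str.splitlines ex))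
            (PySem.Str.splitlines ex))) ++ "\n") := rfl
  have hB : merge_env_text_alt ex updates =
      (if ((PySem.Str.splitlines ex).reverse.foldl (stepB (PySem.Dict.ofList updates))
              ([], PySem.Set.empty)).1.reverse ++
            ((PySem.Dict.ofList updates).items.filter (fun kv =>
              !(PySem.Set.contains ((PySem.Str.splitlines ex).reverse.foldl
                  (stepB (PySem.Dict.ofList updates)) ([], PySem.Set.empty)).2 kv.1))).map
              (fun kv => kv.1 ++ "=" ++ kv.2) = [] then ""
       else PySem.Str.rstrip (PySem.Str.join "\n"
         (((PySem.Str.splitlines ex).reverse.foldl (stepB (PySem.Dict.ofList updates))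
              ([], PySem.Set.empty)).1.reverse ++
            ((PySem.Dict.ofList updates).items.filter (fun kv =>
              !(PySem.Set.contains ((PySem.Str.splitlines ex).reverse.foldl
                  (stepB (PySem.Dict.ofList updates)) ([], PySem.Set.empty)).2 kv.1))).map
              (fun kv => kv.1 ++ "=" ++ kv.2))) ++ "\n") := rfl
  rw [hA, hB]
  have hLA : (PySem.Dict.ofList updates).items.foldl (stepA (PySem.Str.splitlines ex))
        (PySem.Str.splitlines ex)
      = canon (fun k => (PySem.Dict.ofList updates).get? k) (PySem.Str.splitlines ex)
        ++ apps (PySem.Dict.ofList updates).items (PySem.Str.splitlines ex) := by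
    have hfold := foldA (PySem.Str.splitlines ex) (PySem.Dict.ofList updates).items
      (fun _ => none) [] hnd' (fun _ _ => rfl)
    rw [canon_none, List.append_nil, List.append_nil] at hfold
    have hfun : (fun k => (List.lookup k (PySem.Dict.ofList updates).items).or
          ((fun _ => none) k))
        = fun k => (PySem.Dict.ofList updates).get? k := by
      funext k
      rw [Option.or_none, lookup_items_eq_get? _ hkeys k]
    rw [hfun] at hfold
    exact hfold
  obtain ⟨hb1, hb2⟩ := foldB (PySem.Str.splitlines ex) (PySem.Dict.ofList updates)
  have hLB : ((PySem.Str.splitlines ex).reverse.foldl (stepB (PySem.Dict.ofList updates))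
          ([], PySem.Set.empty)).1.reverse ++
        ((PySem.Dict.ofList updates).items.filter (fun kv =>
          !(PySem.Set.contains ((PySem.Str.splitlines ex).reverse.foldl
              (stepB (PySem.Dict.ofList updates)) ([], PySem.Set.empty)).2 kv.1))).map
          (fun kv => kv.1 ++ "=" ++ kv.2)
      = canon (fun k => (PySem.Dict.ofList updates).get? k) (PySem.Str.splitlines ex)
        ++ apps (PySem.Dict.ofList updates).items (PySem.Str.splitlines ex) := by
    rw [hb1, List.reverse_reverse]
    congr 1
    unfold apps
    congr 1
    apply List.filter_congr
    intro kv hkv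
    obtain ⟨k1, v1⟩ := kv
    simp only [hb2, PySem.Dict.get?_of_mem_items (PySem.Dict.ofList updates) hkv hkeys,
      Option.isSome_some, Bool.true_and]
  rw [hLA, hLB]
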